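/- GENERATED by mk_final_copies.py from the proof of the farm's unit `floor` (farm:floor.1: Proof.lean) as the
   re-elaboration sweep compiled it — do not edit. -/
import Vorbis.Spec.Units.floor

open X86 X86.User Asan Vorbis

set_option maxRecDepth 4000
set_option maxHeartbeats 4000000

namespace Vorbis.Spec.floor
end Vorbis.Spec.floor

/-- `floor(xmm0 = x)` satisfies its contract: 15 instructions, no store, no check call; three branches on float compares
(`comisd` + `jbe`), every arm walked to its `ret`. The SSE values stay opaque; nothing is written, so the post
(`ShadowUntouched`) is `w_mem : s.mem = u.mem` on every path. -/
theorem Vorbis.Spec.Worked.floor_ok : Vorbis.Spec.floor.Statement := by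
  intro Lay hLay μ hμ u₀ hcode others frames u ret he hpre
  v_entry he
  have hsp := hpre.rsp
  -- 0x102380 (libm.c:50): ONE walk over all four paths; each ends after a `ret`
  u_walk hcode [hμ.vendor] span [Vorbis.L.textLo, Vorbis.L.textHi] side (v_side)
  · -- 0x102388 taken (libm.c:50, `!(x > -2^52)` or unordered): `ret` at 0x1023bd, x returned as it is
    refine ReachVia.done ?_
    v_returned
    -- the post: no store on this path, so no byte of the shadow was written
    show ShadowUntouched u.mem _
    v_untouched
  · -- 0x102396 taken (libm.c:50, `!(x < 2^52)`): `ret` at 0x1023bd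
    refine ReachVia.done ?_
    v_returned
    -- the post: no store on this path, so no byte of the shadow was written
    show ShadowUntouched u.mem _
    v_untouched
  · -- 0x1023aa taken (libm.c:54, `!(t > x)`): `movapd xmm0, xmm1 ; ret` at 0x1023b9
    refine ReachVia.done ?_
    v_returned
    -- the post: no store on this path, so no byte of the shadow was written
    show ShadowUntouched u.mem _
    v_untouched
  · -- 0x1023aa not taken (libm.c:55, `t = t - 1.0`): `subsd ; movapd ; ret` at 0x1023b8
    refine ReachVia.done ?_
    v_returned
    -- the post: no store on this path, so no byte of the shadow was written
    show ShadowUntouched u.mem _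
    v_untouched
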